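-- pv_equiv track=rewrite | github.com/borabekarr/sales_Agent_eng | scripts/comprehensive_knowledge_import.py | get_question_purpose
-- ===== SOURCE A (Python) =====
-- def get_question_purpose(question: str) -> str:
--     """Determine the purpose of a question"""
--     question_lower = question.lower()
--
--     if any(word in question_lower for word in ["pain", "problem", "challenge", "struggle"]):
--         return "pain_discovery"
--     elif any(word in question_lower for word in ["goal", "want", "achieve", "future"]):
--         return "goal_identification"
--     elif any(word in question_lower for word in ["current", "now", "today", "situation"]):
--         return "current_state_analysis"
--     else:
--         return "general_discovery"
-- ===== SOURCE B (Python) =====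
-- def get_question_purpose(question: str) -> str:
--     """Determine the purpose of a question"""
--     q = question.lower()
--     pain = goal = cur = False
--     # single left-to-right scan: at each index, test whether a keyword starts there
--     for i in range(len(q)):
--         pain = pain or q.startswith(("pain", "problem", "challenge", "struggle"), i)
--         goal = goal or q.startswith(("goal", "want", "achieve", "future"), i)
--         cur = cur or q.startswith(("current", "now", "today", "situation"), i)
--     if pain:
--         return "pain_discovery"
--     if goal:
--         return "goal_identification"
--     if cur:
--         return "current_state_analysis"
--     return "general_discovery"
-- ===== Notes on version B (the rewrite author's own statement) =====
-- stated objective: alternative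
-- what changed: Instead of running a separate whole-string substring search per keyword per category, B makes one left-to-right scan of the lowercased question, testing at each index with startswith which category keywords begin there and accumulating three match flags, then picks the category by priority.
import Mathlib
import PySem

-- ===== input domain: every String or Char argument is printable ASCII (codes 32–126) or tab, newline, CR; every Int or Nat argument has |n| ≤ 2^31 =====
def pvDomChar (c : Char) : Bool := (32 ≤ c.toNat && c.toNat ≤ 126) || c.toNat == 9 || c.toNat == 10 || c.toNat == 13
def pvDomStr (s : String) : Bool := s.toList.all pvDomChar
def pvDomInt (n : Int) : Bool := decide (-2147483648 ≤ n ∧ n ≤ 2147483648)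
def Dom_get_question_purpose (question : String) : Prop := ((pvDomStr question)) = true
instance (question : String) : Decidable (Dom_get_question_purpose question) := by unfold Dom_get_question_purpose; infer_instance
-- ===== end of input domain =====

-- B replaces per-keyword substring searches by a single positional scan accumulating three category flags (alternative algorithm, same cost).


-- ===== PORT A =====
def get_question_purpose (question : String) : String :=
  let question_lower := PySem.Str.lower question
  if (["pain", "problem", "challenge", "struggle"] : List String).any (fun word => PySem.Str.isIn word question_lower) then
    "pain_discovery"
  else if (["goal", "want", "achieve", "future"] : List String).any (fun word => PySem.Str.isIn word question_lower) then
    "goal_identification"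
  else if (["current", "now", "today", "situation"] : List String).any (fun word => PySem.Str.isIn word question_lower) then
    "current_state_analysis"
  else
    "general_discovery"

-- ===== PORT B =====
def pvK1 : List String := ["pain", "problem", "challenge", "struggle"]
def pvK2 : List String := ["goal", "want", "achieve", "future"]
def pvK3 : List String := ["current", "now", "today", "situation"]

-- q.startswith((kws...), i) at the suffix starting at index i
def pvHit (kws : List String) (s : List Char) : Bool :=
  kws.any (fun k => k.toList.isPrefixOf s)

-- the for-loop over indices i of q: recursion over the suffixes of q, three flags as state
def pvScan : List Char → Bool × Bool × Bool → Bool × Bool × Bool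
  | [], acc => acc
  | a :: t, (p, g, c) =>
      pvScan t (p || pvHit pvK1 (a :: t), g || pvHit pvK2 (a :: t), c || pvHit pvK3 (a :: t))

def get_question_purpose_alt (question : String) : String :=
  let q := PySem.Str.lower question
  let r := pvScan q.toList (false, false, false)
  if r.1 then "pain_discovery"
  else if r.2.1 then "goal_identification"
  else if r.2.2 then "current_state_analysis"
  else "general_discovery"

-- ===== PRECONDITION & SPEC =====
def Spec_get_question_purpose (question : String) (out : String) : Prop := out = get_question_purpose_alt question
instance (question : String) (out : String) : Decidable (Spec_get_question_purpose question out) := by unfold Spec_get_question_purpose; infer_instance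

-- ===== CLAIM =====
def Claim_equal_get_question_purpose : Prop := ∀ (question : String), Dom_get_question_purpose question → Spec_get_question_purpose question (get_question_purpose question)

-- ===== LEMMAS AND PROOFS =====

-- "did any suffix (at index < length) hit?"
def pvAnySuf (f : List Char → Bool) : List Char → Bool
  | [] => false
  | a :: t => f (a :: t) || pvAnySuf f t

theorem pvScan_eq (l : List Char) (p g c : Bool) :
    pvScan l (p, g, c) =
      (p || pvAnySuf (pvHit pvK1) l, g || pvAnySuf (pvHit pvK2) l, c || pvAnySuf (pvHit pvK3) l) := by
  induction l generalizing p g c with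
  | nil => simp [pvScan, pvAnySuf]
  | cons a t ih => simp [pvScan, pvAnySuf, ih, Bool.or_assoc]

theorem pvAnySuf_true_iff (f : List Char → Bool) (l : List Char) :
    pvAnySuf f l = true ↔ ∃ j, j < l.length ∧ f (l.drop j) = true := by
  induction l with
  | nil => simp [pvAnySuf]
  | cons a t ih =>
    simp only [pvAnySuf, Bool.or_eq_true, ih]
    constructor
    · rintro (h | ⟨j, hj, hf⟩)
      · exact ⟨0, by simp, h⟩
      · exact ⟨j + 1, by simpa using hj, by simpa using hf⟩
    · rintro ⟨j, hj, hf⟩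
      cases j with
      | zero => exact Or.inl (by simpa using hf)
      | succ j => exact Or.inr ⟨j, by simpa using hj, by simpa using hf⟩

theorem pvAnySuf_hit_eq (kws : List String) (h : ∀ k ∈ kws, k.toList ≠ []) (l : List Char) :
    pvAnySuf (pvHit kws) l = kws.any (fun k => PySem.Chars.isIn k.toList l) := by
  rw [Bool.eq_iff_iff]
  rw [pvAnySuf_true_iff]
  simp only [pvHit, List.any_eq_true, List.isPrefixOf_iff_prefix]
  constructor
  · rintro ⟨j, hj, k, hk, hpre⟩
    exact ⟨k, hk, (PySem.Chars.exists_prefix_drop_iff_isIn k.toList l).mp ⟨j, hpre⟩⟩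
  · rintro ⟨k, hk, hin⟩
    obtain ⟨j, hpre⟩ := (PySem.Chars.exists_prefix_drop_iff_isIn k.toList l).mpr hin
    by_cases hlt : j < l.length
    · exact ⟨j, hlt, k, hk, hpre⟩
    · exfalso
      have : l.drop j = [] := List.drop_eq_nil_of_le (by omega)
      rw [this] at hpre
      exact h k hk (List.prefix_nil.mp hpre)

-- ===== VERDICT =====
theorem get_question_purpose_spec : Claim_equal_get_question_purpose := by
  intro question _
  unfold Spec_get_question_purpose get_question_purpose get_question_purpose_alt
  simp only [pvScan_eq,
    pvAnySuf_hit_eq pvK1 (by decide), pvAnySuf_hit_eq pvK2 (by decide), pvAnySuf_hit_eq pvK3 (by decide)]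
  simp [pvK1, pvK2, pvK3]
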